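-- pv_equiv track=rewrite | github.com/pypi-data/pypi-mirror-402 | packages/mcp-souschef/mcp_souschef-2.8.0.tar.gz/mcp_souschef-2.8.0/souschef/ui/app.py | _extract_circular_and_community_deps
-- ===== SOURCE A (Python) =====
-- SECTION_COMMUNITY_COOKBOOKS_HEADER = "Community Cookbooks:"
--
-- def _extract_circular_and_community_deps(lines):
--     """Extract circular dependencies and community cookbooks."""
--     circular_deps: list[tuple[str, str]] = []
--     community_cookbooks: list[str] = []
--     current_section = None
--
--     for line in lines:
--         current_section = _update_current_section(line, current_section)
--         if _is_list_item(line) and current_section: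
--             _process_list_item(
--                 line, current_section, circular_deps, community_cookbooks
--             )
--
--     return circular_deps, community_cookbooks
--
-- def _update_current_section(line, current_section):
--     """Update the current section based on the line content."""
--     line = line.strip()
--     if "Circular Dependencies:" in line:
--         return "circular"
--     elif SECTION_COMMUNITY_COOKBOOKS_HEADER in line:
--         return "community"
--     return current_section
--
-- def _is_list_item(line):
--     """Check if the line is a list item."""
--     return line.strip().startswith("- ")
--
-- def _process_list_item(line, current_section, circular_deps, community_cookbooks):
--     """Process a list item based on the current section."""
--     if current_section == "circular":
--         _process_circular_dependency_item(line, circular_deps)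
--     elif current_section == "community":
--         _process_community_cookbook_item(line, community_cookbooks)
--
-- def _process_circular_dependency_item(line, circular_deps):
--     """Process a circular dependency list item."""
--     dep_text = line[2:].strip()
--     if "->" in dep_text:
--         parts = dep_text.split("->")
--         if len(parts) >= 2:
--             circular_deps.append((parts[0].strip(), parts[1].strip()))
--
-- def _process_community_cookbook_item(line, community_cookbooks):
--     """Process a community cookbook list item."""
--     cookbook = line[2:].strip()
--     if cookbook:
--         community_cookbooks.append(cookbook)
-- ===== SOURCE B (Python) =====
-- def _extract_circular_and_community_deps(lines):
--     """Extract circular dependencies and community cookbooks."""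
--     # Pass 1: label each line with the section in force at that line.
--     labels = []
--     current = None
--     for line in lines:
--         stripped = line.strip()
--         if "Circular Dependencies:" in stripped:
--             current = "circular"
--         elif "Community Cookbooks:" in stripped:
--             current = "community"
--         labels.append(current)
--     # Pass 2: circular dependencies from the lines labelled 'circular'.
--     circular_deps = []
--     for label, line in zip(labels, lines):
--         if label == "circular" and line.strip().startswith("- "):
--             dep_text = line[2:].strip()
--             if "->" in dep_text:
--                 parts = dep_text.split("->")
--                 if len(parts) >= 2:
--                     circular_deps.append((parts[0].strip(), parts[1].strip()))
--     # Pass 3: community cookbooks from the lines labelled 'community'.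
--     community_cookbooks = []
--     for label, line in zip(labels, lines):
--         if label == "community" and line.strip().startswith("- "):
--             cookbook = line[2:].strip()
--             if cookbook:
--                 community_cookbooks.append(cookbook)
--     return circular_deps, community_cookbooks
-- ===== Notes on version B (the rewrite author's own statement) =====
-- stated objective: alternative
-- what changed: Replaces the single stateful dispatch loop (section state and both accumulators updated together per line) by a section-labeling pass that records the section in force at each line, followed by two independent filtering passes over zip(labels, lines) that each build one of the two result lists.
import Mathlib
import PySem

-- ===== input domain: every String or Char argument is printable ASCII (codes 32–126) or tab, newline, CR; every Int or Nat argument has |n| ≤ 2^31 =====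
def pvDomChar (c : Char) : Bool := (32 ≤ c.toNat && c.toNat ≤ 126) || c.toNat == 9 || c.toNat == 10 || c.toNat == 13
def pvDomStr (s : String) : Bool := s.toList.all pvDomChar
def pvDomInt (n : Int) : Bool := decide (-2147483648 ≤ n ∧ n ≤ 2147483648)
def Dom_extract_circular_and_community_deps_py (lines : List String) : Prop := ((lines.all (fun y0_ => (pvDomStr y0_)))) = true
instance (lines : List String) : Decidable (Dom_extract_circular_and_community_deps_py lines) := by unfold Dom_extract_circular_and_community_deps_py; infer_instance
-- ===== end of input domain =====

-- B replaces A's single stateful dispatch loop by a section-labeling pass plus two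
-- independent filtering passes over the labelled lines (alternative decomposition, same cost).

-- ===== PORT A =====
-- _update_current_section
def pvUpdateSection (line : String) (cur : Option String) : Option String :=
  let l := PySem.Str.strip line
  if PySem.Str.isIn "Circular Dependencies:" l then some "circular"
  else if PySem.Str.isIn "Community Cookbooks:" l then some "community"
  else cur

-- _is_list_item
def pvIsListItem (line : String) : Bool :=
  PySem.Str.startswith (PySem.Str.strip line) "- "

-- _process_circular_dependency_item (returns the updated circular_deps list)
def pvProcCirc (line : String) (cd : List (String × String)) : List (String × String) :=
  let dep_text := PySem.Str.strip (PySem.Str.slice line (some 2) none)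
  if PySem.Str.isIn "->" dep_text then
    let parts := (PySem.Str.split? dep_text "->").getD []
    if 2 ≤ parts.length then
      cd ++ [(PySem.Str.strip (parts[0]?.getD ""), PySem.Str.strip (parts[1]?.getD ""))]
    else cd
  else cd

-- _process_community_cookbook_item (returns the updated community_cookbooks list)
def pvProcComm (line : String) (cc : List String) : List String :=
  let cookbook := PySem.Str.strip (PySem.Str.slice line (some 2) none)
  if cookbook ≠ "" then cc ++ [cookbook] else cc

-- _process_list_item
def pvProcessListItem (line : String) (cur : Option String)
    (cd : List (String × String)) (cc : List String) :
    List (String × String) × List String :=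
  if cur = some "circular" then (pvProcCirc line cd, cc)
  else if cur = some "community" then (cd, pvProcComm line cc)
  else (cd, cc)

-- main loop of A; 'current_section' truthiness is cur.isSome (the stored strings are nonempty)
def pvLoopA (st : List (String × String) × List String × Option String) (line : String) :
    List (String × String) × List String × Option String :=
  let cur := pvUpdateSection line st.2.2
  if pvIsListItem line && cur.isSome then
    let r := pvProcessListItem line cur st.1 st.2.1
    (r.1, r.2, cur)
  else (st.1, st.2.1, cur)

def extract_circular_and_community_deps_py (lines : List String) :
    (List (String × String)) × List String :=
  let st := lines.foldl pvLoopA ([], [], none)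
  (st.1, st.2.1)

-- ===== PORT B =====
def extract_circular_and_community_deps_py_alt (lines : List String) :
    (List (String × String)) × List String :=
  -- Pass 1: label each line with the section in force at it
  let labels := (lines.foldl
    (fun (st : List (Option String) × Option String) line =>
      let stripped := PySem.Str.strip line
      let current :=
        if PySem.Str.isIn "Circular Dependencies:" stripped then some "circular"
        else if PySem.Str.isIn "Community Cookbooks:" stripped then some "community"
        else st.2
      (st.1 ++ [current], current)) ([], none)).1
  -- Pass 2: circular dependencies from lines labelled 'circular'
  let circular_deps := (labels.zip lines).foldl
    (fun cd (p : Option String × String) =>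
      if p.1 = some "circular" && PySem.Str.startswith (PySem.Str.strip p.2) "- " then
        let dep_text := PySem.Str.strip (PySem.Str.slice p.2 (some 2) none)
        if PySem.Str.isIn "->" dep_text then
          let parts := (PySem.Str.split? dep_text "->").getD []
          if 2 ≤ parts.length then
            cd ++ [(PySem.Str.strip (parts[0]?.getD ""), PySem.Str.strip (parts[1]?.getD ""))]
          else cd
        else cd
      else cd) []
  -- Pass 3: community cookbooks from lines labelled 'community'
  let community_cookbooks := (labels.zip lines).foldl
    (fun cc (p : Option String × String) =>
      if p.1 = some "community" && PySem.Str.startswith (PySem.Str.strip p.2) "- " then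
        let cookbook := PySem.Str.strip (PySem.Str.slice p.2 (some 2) none)
        if cookbook ≠ "" then cc ++ [cookbook] else cc
      else cc) []
  (circular_deps, community_cookbooks)

-- ===== PRECONDITION & SPEC =====
def Spec_extract_circular_and_community_deps_py (lines : List String) (out : (List (String × String)) × List String) : Prop := out = extract_circular_and_community_deps_py_alt lines
instance (lines : List String) (out : (List (String × String)) × List String) : Decidable (Spec_extract_circular_and_community_deps_py lines out) := by unfold Spec_extract_circular_and_community_deps_py; infer_instance

-- ===== CLAIM (what is proved, stated in full; the proofs are below) =====
def Claim_equal_extract_circular_and_community_deps_py : Prop := ∀ (lines : List String), Dom_extract_circular_and_community_deps_py lines → Spec_extract_circular_and_community_deps_py lines (extract_circular_and_community_deps_py lines)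

-- ===== LEMMAS AND PROOFS =====

-- recursive form of B's label list, carrying the section state
def pvLab (cur : Option String) : List String → List (Option String)
  | [] => []
  | l :: ls => pvUpdateSection l cur :: pvLab (pvUpdateSection l cur) ls

-- B's step functions, named for the proofs
def pvStepC (cd : List (String × String)) (p : Option String × String) : List (String × String) :=
  if p.1 = some "circular" && PySem.Str.startswith (PySem.Str.strip p.2) "- " then
    pvProcCirc p.2 cd
  else cd

def pvStepM (cc : List String) (p : Option String × String) : List String :=
  if p.1 = some "community" && PySem.Str.startswith (PySem.Str.strip p.2) "- " then
    pvProcComm p.2 cc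
  else cc

lemma pvLab_labels (lines : List String) :
    ∀ (acc : List (Option String)) (cur : Option String),
    (lines.foldl (fun (st : List (Option String) × Option String) line =>
      let stripped := PySem.Str.strip line
      let current :=
        if PySem.Str.isIn "Circular Dependencies:" stripped then some "circular"
        else if PySem.Str.isIn "Community Cookbooks:" stripped then some "community"
        else st.2
      (st.1 ++ [current], current)) (acc, cur)).1 = acc ++ pvLab cur lines := by
  induction lines with
  | nil => intro acc cur; simp [pvLab]
  | cons l ls ih =>
    intro acc cur
    simp only [List.foldl_cons, pvLab]
    rw [ih]
    simp [pvUpdateSection]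

-- the section state after processing 'lines' starting from 'cur'
def pvLastSec (cur : Option String) : List String → Option String
  | [] => cur
  | l :: ls => pvLastSec (pvUpdateSection l cur) ls

lemma pvLoopA_fold (lines : List String) :
    ∀ (cur : Option String) (cd : List (String × String)) (cc : List String),
    lines.foldl pvLoopA (cd, cc, cur) =
      (((pvLab cur lines).zip lines).foldl pvStepC cd,
       ((pvLab cur lines).zip lines).foldl pvStepM cc,
       pvLastSec cur lines) := by
  induction lines with
  | nil => intro cur cd cc; simp [pvLab, pvLastSec]
  | cons l ls ih =>
    intro cur cd cc
    have hstep : pvLoopA (cd, cc, cur) l =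
        (pvStepC cd (pvUpdateSection l cur, l),
         pvStepM cc (pvUpdateSection l cur, l),
         pvUpdateSection l cur) := by
      unfold pvLoopA pvStepC pvStepM pvProcessListItem
      cases hc : pvUpdateSection l cur with
      | none => simp
      | some s =>
        by_cases hl : pvIsListItem l = true <;>
        by_cases h1 : s = "circular" <;> by_cases h2 : s = "community" <;>
          simp_all [pvIsListItem]
    simp only [List.foldl_cons, pvLab, List.zip_cons_cons, pvLastSec]
    rw [hstep, ih]

-- ===== VERDICT (by name: the statement is the Claim_ definition above) =====
theorem extract_circular_and_community_deps_py_spec : Claim_equal_extract_circular_and_community_deps_py := by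
  intro lines _
  unfold Spec_extract_circular_and_community_deps_py
  unfold extract_circular_and_community_deps_py extract_circular_and_community_deps_py_alt
  rw [pvLab_labels lines [] none, List.nil_append, pvLoopA_fold lines none [] []]
  rfl
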